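-- pv_equiv track=rewrite | github.com/p1nka/bank_compliance_v3 | agents/supervisor_agent.py | _determine_routing
-- ===== SOURCE A (Python) =====
-- from typing import Dict, List, Any, Optional
--
-- def _determine_routing(decisions: List[Dict]) -> str:
--     """Determine workflow routing based on decisions"""
--
--     critical_decisions = [d for d in decisions if d.get("priority") == "critical"]
--
--     if critical_decisions:
--         return "escalate"
--     elif any(d.get("priority") == "high" for d in decisions):
--         return "requires_review"
--     else:
--         return "proceed_to_reporting"
-- ===== SOURCE B (Python) =====
-- def _determine_routing(decisions):
--     """Single pass: escalate immediately on critical, remember highs."""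
--     has_high = False
--     for d in decisions:
--         p = d.get("priority")
--         if p == "critical":
--             return "escalate"
--         if p == "high":
--             has_high = True
--     return "requires_review" if has_high else "proceed_to_reporting"
-- ===== Notes on version B (the rewrite author's own statement) =====
-- stated objective: alternative
-- what changed: Replaces the list-comprehension filter plus separate any() scan (two traversals) with one early-exit loop over decisions carrying a has_high accumulator flag.
import Mathlib
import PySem

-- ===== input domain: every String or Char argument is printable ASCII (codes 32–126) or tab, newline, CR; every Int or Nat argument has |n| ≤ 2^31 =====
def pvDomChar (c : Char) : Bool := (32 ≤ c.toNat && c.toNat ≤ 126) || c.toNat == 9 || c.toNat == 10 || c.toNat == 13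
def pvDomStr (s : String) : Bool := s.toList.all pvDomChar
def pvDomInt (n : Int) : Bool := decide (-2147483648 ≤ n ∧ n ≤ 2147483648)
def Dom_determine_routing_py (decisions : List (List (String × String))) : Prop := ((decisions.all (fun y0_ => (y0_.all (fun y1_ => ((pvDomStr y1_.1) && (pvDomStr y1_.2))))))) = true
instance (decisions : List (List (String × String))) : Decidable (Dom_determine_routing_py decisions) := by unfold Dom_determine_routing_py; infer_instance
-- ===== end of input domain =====

-- B rewrite: one early-exit loop with a has_high accumulator instead of a filter pass plus a separate any() pass.

-- shared helper: d.get("priority") on the association-list dict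
def pvGetPriority (d : List (String × String)) : Option String :=
  (PySem.Dict.ofList d).get? "priority"

-- ===== PORT A =====
def determine_routing_py (decisions : List (List (String × String))) : String :=
  let critical_decisions := decisions.filter (fun d => pvGetPriority d == some "critical")
  if critical_decisions ≠ [] then "escalate"
  else if decisions.any (fun d => pvGetPriority d == some "high") then "requires_review"
  else "proceed_to_reporting"

-- ===== PORT B =====
def determine_routing_alt_go : List (List (String × String)) → Bool → String
  | [], has_high => if has_high then "requires_review" else "proceed_to_reporting"
  | d :: rest, has_high =>
      let p := pvGetPriority d
      if p == some "critical" then "escalate"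
      else determine_routing_alt_go rest (has_high || (p == some "high"))

def determine_routing_py_alt (decisions : List (List (String × String))) : String :=
  determine_routing_alt_go decisions false

-- ===== PRECONDITION & SPEC =====
def Spec_determine_routing_py (decisions : List (List (String × String))) (out : String) : Prop := out = determine_routing_py_alt decisions
instance (decisions : List (List (String × String))) (out : String) : Decidable (Spec_determine_routing_py decisions out) := by unfold Spec_determine_routing_py; infer_instance

-- ===== CLAIM (what is proved, stated in full; the proofs are below) =====
def Claim_equal_determine_routing_py : Prop := ∀ (decisions : List (List (String × String))), Dom_determine_routing_py decisions → Spec_determine_routing_py decisions (determine_routing_py decisions)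

-- ===== LEMMAS AND PROOFS =====

lemma determine_routing_alt_go_eq (ds : List (List (String × String))) (h : Bool) :
    determine_routing_alt_go ds h =
      if ds.filter (fun d => pvGetPriority d == some "critical") ≠ [] then "escalate"
      else if h || ds.any (fun d => pvGetPriority d == some "high") then "requires_review"
      else "proceed_to_reporting" := by
  induction ds generalizing h with
  | nil => simp [determine_routing_alt_go]
  | cons d rest ih =>
    by_cases hc : (pvGetPriority d == some "critical") = true
    · simp [determine_routing_alt_go, hc]
    · simp only [Bool.not_eq_true] at hc
      simp [determine_routing_alt_go, hc, ih, List.any_cons, Bool.or_assoc]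

-- ===== VERDICT (by name: the statement is the Claim_ definition above) =====
theorem determine_routing_py_spec : Claim_equal_determine_routing_py := by
  intro ds _
  unfold Spec_determine_routing_py determine_routing_py determine_routing_py_alt
  rw [determine_routing_alt_go_eq]
  simp
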